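-- pv_equiv track=rewrite | github.com/joseph-bongo-220/TV_NLP_Project | NLP.py | subsum_correction
-- ===== SOURCE A (Python) =====
-- def subsum_correction(tf_dict_list):
--     """correct the term frequency for subsumed terms
--     i.e. if two keyphrases are 'jumbo shrimp' and 'jumbo', then this would
--     correct the count of 'jumbo' to not double count the word 'jumbo'
--     that occurs in 'jumbo shrimp'"""
--
--     # iterate over list of term frequency dictionaries
--     for tf_dict in tf_dict_list:
--         # iterate over given term frequency dictionary
--         for key, val in tf_dict.items():
--             # if the given term is an ngram with n>1
--             if len(key.split(sep="_")) >= 2: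
--                 # subtract the phrase valuefrom the word if applicable
--                 for word in key.split(sep="_"):
--                     try:
--                         tf_dict[word]=tf_dict[word]-tf_dict[key]
--                     # if not pplicable then we do nothing
--                     except KeyError:
--                         pass
--
--     return tf_dict_list
-- ===== SOURCE B (Python) =====
-- def subsum_correction(tf_dict_list):
--     """Two-pass rewrite: for each dict, first accumulate per-word correction
--     totals from every multi-word (underscore-joined) key, then apply each
--     total with a single subtraction; mutates the dicts in place like the
--     original and returns the same list object."""
--     for tf_dict in tf_dict_list:
--         corr = {}
--         for key in tf_dict:
--             words = key.split(sep="_")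
--             if len(words) >= 2:
--                 for word in words:
--                     if word in tf_dict:
--                         corr[word] = corr.get(word, 0) + tf_dict[key]
--         for word, total in corr.items():
--             tf_dict[word] = tf_dict[word] - total
--     return tf_dict_list
-- ===== Notes on version B (the rewrite author's own statement) =====
-- stated objective: alternative
-- what changed: Instead of A's single pass that performs one dictionary-update subtraction per token occurrence of every multi-word key (reading and writing the dict as it goes), B first accumulates a per-word correction total in a separate dict (one pass over the keys) and then applies each word's total with a single subtraction in a second pass.
import Mathlib
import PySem

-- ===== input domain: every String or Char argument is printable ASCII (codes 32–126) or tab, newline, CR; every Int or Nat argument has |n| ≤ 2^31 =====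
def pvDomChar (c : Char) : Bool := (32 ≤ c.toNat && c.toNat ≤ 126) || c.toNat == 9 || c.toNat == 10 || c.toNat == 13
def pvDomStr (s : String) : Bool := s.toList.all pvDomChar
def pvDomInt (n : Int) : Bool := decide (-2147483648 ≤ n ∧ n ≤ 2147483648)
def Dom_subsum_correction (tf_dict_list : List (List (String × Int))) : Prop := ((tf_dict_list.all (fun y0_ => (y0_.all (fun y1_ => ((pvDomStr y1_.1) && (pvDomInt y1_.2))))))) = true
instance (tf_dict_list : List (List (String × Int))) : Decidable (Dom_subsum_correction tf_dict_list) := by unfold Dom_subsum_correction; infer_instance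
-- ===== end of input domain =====

-- B replaces A's one subtraction per token occurrence (updating the dict as it scans) by an
-- accumulate-then-apply two-pass scheme: per-word correction totals first, one subtraction per word after.
-- Both versions mutate the input dicts in place and return the same list object; the equivalence proved
-- here is about the returned value (each dict as its association list of items).

-- key.split(sep="_") — "_" is non-empty, so split? always returns some
def pvSplitU (s : String) : List String := (PySem.Str.split? s "_").getD []

-- ===== PORT A =====
-- tf_dict[word] = tf_dict[word] - tf_dict[key], with KeyError on the tf_dict[word] read doing nothing;
-- the tf_dict[key] read never fails (key comes from the dict's own items), ported as the same match.
def pvStepWordA (key : String) (d : PySem.Dict String Int) (w : String) : PySem.Dict String Int :=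
  match d.get? w with
  | none => d
  | some a =>
    match d.get? key with
    | some b => d.insert w (a - b)
    | none => d

-- one term-frequency dict: iterate over its items (their keys; the bound val is unused by A's loop body)
def pvDictA (l : List (String × Int)) : List (String × Int) :=
  (l.foldl (fun d kv =>
      if 2 ≤ (pvSplitU kv.1).length then (pvSplitU kv.1).foldl (pvStepWordA kv.1) d else d)
    (PySem.Dict.mk l)).items

def subsum_correction (tf_dict_list : List (List (String × Int))) : List (List (String × Int)) :=
  tf_dict_list.map pvDictA

-- ===== PORT B =====
-- first pass: corr[word] = corr.get(word, 0) + tf_dict[key]  (tf_dict[key] never fails: key is a key of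
-- tf_dict, ported as getD); second pass: tf_dict[word] = tf_dict[word] - total (word always present, ported as getD)
def pvDictB (l : List (String × Int)) : List (String × Int) :=
  let d0 := PySem.Dict.mk l
  let corr := l.foldl (fun c kv =>
      if 2 ≤ (pvSplitU kv.1).length then
        (pvSplitU kv.1).foldl (fun c w =>
          if d0.contains w then c.modify w 0 (· + d0.getD kv.1 0) else c) c
      else c)
    PySem.Dict.empty
  (corr.items.foldl (fun d wc => d.insert wc.1 (d.getD wc.1 0 - wc.2)) d0).items

def subsum_correction_alt (tf_dict_list : List (List (String × Int))) : List (List (String × Int)) :=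
  tf_dict_list.map pvDictB

-- ===== PRECONDITION & SPEC =====
def Spec_subsum_correction (tf_dict_list : List (List (String × Int))) (out : List (List (String × Int))) : Prop := out = subsum_correction_alt tf_dict_list
instance (tf_dict_list : List (List (String × Int))) (out : List (List (String × Int))) : Decidable (Spec_subsum_correction tf_dict_list out) := by unfold Spec_subsum_correction; infer_instance

-- ===== CLAIM (what is proved, stated in full; the proofs are below) =====
def Claim_equal_subsum_correction : Prop := ∀ (tf_dict_list : List (List (String × Int))), Dom_subsum_correction tf_dict_list → Spec_subsum_correction tf_dict_list (subsum_correction tf_dict_list)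

-- ===== LEMMAS AND PROOFS =====

-- `ovr l f`: the association list l with the value of every entry whose key is in f's domain overridden
def pvOvr (l : List (String × Int)) (f : String → Option Int) : List (String × Int) :=
  l.map (fun kv => match f kv.1 with | some x => (kv.1, x) | none => kv)

-- "subtract p.2 from key p.1 if present": the elementary dict update both programs are built from
def pvSub (d : PySem.Dict String Int) (p : String × Int) : PySem.Dict String Int :=
  if d.contains p.1 then d.insert p.1 (d.getD p.1 0 - p.2) else d

-- total amount subtracted from key w by a list of elementary updates
def pvTot (ops : List (String × Int)) (w : String) : Int :=
  ((ops.filter (fun p => p.1 == w)).map (·.2)).sum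

-- effect of a run of elementary updates on the override function
def pvF (l : List (String × Int)) (ops : List (String × Int)) (f : String → Option Int) : String → Option Int :=
  fun w => if (PySem.Dict.mk l).contains w = true ∧ w ∈ ops.map Prod.fst then
    some ((f w).getD ((PySem.Dict.mk l).getD w 0) - pvTot ops w) else f w

-- the elementary updates generated by one item of the dict (A applies them one by one, B aggregates them)
def pvOps (l : List (String × Int)) (kv : String × Int) : List (String × Int) :=
  if 2 ≤ (pvSplitU kv.1).length then (pvSplitU kv.1).map (fun w => (w, (PySem.Dict.mk l).getD kv.1 0)) else []

-- ---- string facts: pieces of a "_"-split contain no '_'; a key splitting into ≥ 2 pieces contains '_'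

theorem pv_go_no_sep : ∀ (fuel : Nat) (s cur : List Char) (acc : List (List Char)),
    s.length < fuel → '_' ∉ cur → (∀ p ∈ acc, '_' ∉ p) →
    ∀ p ∈ PySem.Chars.splitOn.go ['_'] fuel s cur acc, '_' ∉ p := by
  intro fuel
  induction fuel with
  | zero => intro s cur acc h; omega
  | succ n ih =>
    intro s cur acc hlen hcur hacc p hp
    match s with
    | [] =>
      simp [PySem.Chars.splitOn.go] at hp
      rcases hp with hp | hp
      · exact hacc _ hp
      · subst hp; simpa using hcur
    | c :: rest =>
      rw [PySem.Chars.splitOn.go] at hp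
      by_cases hc : c = '_'
      · subst hc
        simp only [List.isPrefixOf] at hp
        simp at hp
        exact ih rest [] ((cur.reverse) :: acc) (by simpa using Nat.lt_of_succ_lt_succ (by simpa using hlen)) (by simp) (by
          intro q hq
          rcases List.mem_cons.mp hq with h | h
          · subst h; simpa using hcur
          · exact hacc _ h) p hp
      · have : (['_'].isPrefixOf (c :: rest)) = false := by
          simp [List.isPrefixOf]; exact fun h => hc h.symm
        rw [this] at hp
        simp at hp
        exact ih rest (c :: cur) acc (by simpa using Nat.lt_of_succ_lt_succ (by simpa using hlen))
          (by simp [List.mem_cons]; exact ⟨fun h => hc h.symm, hcur⟩) hacc p hp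

theorem pv_go_no_occ : ∀ (fuel : Nat) (s cur : List Char) (acc : List (List Char)),
    s.length < fuel → '_' ∉ s →
    PySem.Chars.splitOn.go ['_'] fuel s cur acc = acc.reverse ++ [cur.reverse ++ s] := by
  intro fuel
  induction fuel with
  | zero => intro s cur acc h; omega
  | succ n ih =>
    intro s cur acc hlen hs
    match s with
    | [] => simp [PySem.Chars.splitOn.go]
    | c :: rest =>
      rw [PySem.Chars.splitOn.go]
      have hc : ¬ c = '_' := fun h => hs (by simp [h])
      have hpre : (['_'].isPrefixOf (c :: rest)) = false := by
        simp [List.isPrefixOf]; exact fun h => hc h.symm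
      rw [hpre]
      simp only [Bool.false_eq_true, if_false]
      rw [ih rest (c :: cur) acc (by simpa using Nat.lt_of_succ_lt_succ (by simpa using hlen))
        (fun h => hs (List.mem_cons_of_mem _ h))]
      simp

theorem pv_tok_no_sep {w k : String} (h : w ∈ pvSplitU k) : '_' ∉ w.toList := by
  simp [pvSplitU, PySem.Str.split?, PySem.Chars.split?] at h
  obtain ⟨p, hp, rfl⟩ := h
  have := pv_go_no_sep (k.toList.length + 1) k.toList [] [] (by omega) (by simp) (by simp) p
    (by simpa [PySem.Chars.splitOn] using hp)
  simpa using this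

theorem pv_key_has_sep {k : String} (h : 2 ≤ (pvSplitU k).length) : '_' ∈ k.toList := by
  by_contra hno
  have hx := pv_go_no_occ (k.length + 1) k.toList [] [] (by simp) hno
  simp only [pvSplitU, PySem.Str.split?, PySem.Chars.split?, PySem.Chars.splitOn] at h
  simp [hx] at h

-- ---- override-list facts

theorem pv_ovr_none (l : List (String × Int)) : pvOvr l (fun _ => none) = l := by
  simp [pvOvr]

theorem pv_contains_ovr (l : List (String × Int)) (f : String → Option Int) (w : String) :
    (PySem.Dict.mk (pvOvr l f)).contains w = (PySem.Dict.mk l).contains w := by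
  induction l with
  | nil => rfl
  | cons kv rest ih =>
    simp only [pvOvr, List.map_cons, PySem.Dict.contains, PySem.Dict.items, List.any_cons] at *
    cases h : f kv.1 <;> simp [h, ih]

theorem pv_get?_ovr (l : List (String × Int)) (f : String → Option Int) (w : String) :
    (PySem.Dict.mk (pvOvr l f)).get? w = ((PySem.Dict.mk l).get? w).map (fun v => (f w).getD v) := by
  induction l with
  | nil => rfl
  | cons kv rest ih =>
    have hkey : (match f kv.1 with | some x => (kv.1, x) | none => kv).1 = kv.1 := by
      cases hf : f kv.1 <;> simp
    by_cases hb : kv.1 = w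
    · subst hb
      cases hf : f kv.1 with
      | none =>
        simp [pvOvr, PySem.Dict.get?, List.find?, hf]
      | some x =>
        simp [pvOvr, PySem.Dict.get?, List.find?, hf]
    · have h1 : ((match f kv.1 with | some x => (kv.1, x) | none => kv).1 == w) = false := by
        rw [hkey]; simpa using hb
      have h2 : (kv.1 == w) = false := by simpa using hb
      simp only [pvOvr, List.map_cons, PySem.Dict.get?, PySem.Dict.items, List.find?, h1, h2]
      simpa [pvOvr, PySem.Dict.get?] using ih

theorem pv_insert_ovr (l : List (String × Int)) (f : String → Option Int) (w : String) (y : Int)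
    (h : (PySem.Dict.mk l).contains w = true) :
    (PySem.Dict.mk (pvOvr l f)).insert w y
      = PySem.Dict.mk (pvOvr l (fun k => if k = w then some y else f k)) := by
  rw [PySem.Dict.insert]
  rw [pv_contains_ovr, h]
  simp only [if_true]
  congr 1
  simp only [pvOvr, PySem.Dict.items, List.map_map]
  apply List.map_congr_left
  rintro ⟨k0, v0⟩ _
  by_cases hk : k0 = w
  · subst hk
    cases hf : f k0 <;> simp [hf]
  · cases hf : f k0 <;> simp [hf, hk]

-- ---- small facts about getD/pvTot used by the central lemma

theorem pv_getD_ovr (l : List (String × Int)) (f : String → Option Int) (w : String) (v : Int)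
    (hv : (PySem.Dict.mk l).get? w = some v) :
    (PySem.Dict.mk (pvOvr l f)).getD w 0 = (f w).getD v := by
  rw [PySem.Dict.getD, pv_get?_ovr, hv]; rfl

theorem pvTot_cons_self (p : String × Int) (rest : List (String × Int)) :
    pvTot (p :: rest) p.1 = p.2 + pvTot rest p.1 := by
  simp [pvTot, List.filter_cons]

theorem pvTot_cons_ne (p : String × Int) (rest : List (String × Int)) (w : String) (h : ¬ p.1 = w) :
    pvTot (p :: rest) w = pvTot rest w := by
  simp [pvTot, List.filter_cons, h]

theorem pvTot_eq_zero (rest : List (String × Int)) (w : String) (h : w ∉ rest.map Prod.fst) :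
    pvTot rest w = 0 := by
  have : rest.filter (fun p => p.1 == w) = [] := by
    rw [List.filter_eq_nil_iff]
    intro q hq
    simp only [beq_iff_eq]
    exact fun he => h (List.mem_map.mpr ⟨q, hq, he⟩)
  simp [pvTot, this]

theorem pv_mem_get? (l : List (String × Int)) (w : String)
    (h : (PySem.Dict.mk l).contains w = true) : ∃ v, (PySem.Dict.mk l).get? w = some v := by
  rw [PySem.Dict.contains_eq_isSome_get?] at h
  exact Option.isSome_iff_exists.mp h

-- ---- the central lemma: a run of elementary updates on an overridden dict

theorem pv_subrun (l : List (String × Int)) : ∀ (ops : List (String × Int)) (f : String → Option Int),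
    ops.foldl pvSub (PySem.Dict.mk (pvOvr l f)) = PySem.Dict.mk (pvOvr l (pvF l ops f)) := by
  intro ops
  induction ops with
  | nil =>
    intro f
    have : pvF l [] f = f := by funext w; simp [pvF]
    rw [List.foldl_nil, this]
  | cons p rest ih =>
    obtain ⟨pk, pb⟩ := p
    intro f
    rw [List.foldl_cons]
    by_cases hc : (PySem.Dict.mk l).contains pk = true
    · obtain ⟨v, hv⟩ := pv_mem_get? l pk hc
      have hgd : (PySem.Dict.mk (pvOvr l f)).getD pk 0 = (f pk).getD v := pv_getD_ovr l f pk v hv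
      have hsub : pvSub (PySem.Dict.mk (pvOvr l f)) (pk, pb)
          = PySem.Dict.mk (pvOvr l (fun k => if k = pk then some ((f pk).getD v - pb) else f k)) := by
        rw [pvSub]
        simp only []
        rw [pv_contains_ovr, hc, if_pos rfl, hgd, pv_insert_ovr _ _ _ _ hc]
      have hfe : pvF l rest (fun k => if k = pk then some ((f pk).getD v - pb) else f k)
          = pvF l ((pk, pb) :: rest) f := by
        funext w
        by_cases hw : w = pk
        · subst hw
          have hvd : (PySem.Dict.mk l).getD w 0 = v := by rw [PySem.Dict.getD, hv]; rfl
          rw [show pvF l ((w, pb) :: rest) f w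
              = some ((f w).getD v - pvTot ((w, pb) :: rest) w) from by
            simp [pvF, hc, hvd]]
          rw [show pvTot ((w, pb) :: rest) w = pb + pvTot rest w from pvTot_cons_self (w, pb) rest]
          by_cases hm : w ∈ rest.map Prod.fst
          · rw [show pvF l rest (fun k => if k = w then some ((f w).getD v - pb) else f k) w
                = some (((fun k => if k = w then some ((f w).getD v - pb) else f k) w).getD
                    ((PySem.Dict.mk l).getD w 0) - pvTot rest w) from by simp [pvF, hc, hm]]
            simp [hvd]
            ring
          · rw [show pvF l rest (fun k => if k = w then some ((f w).getD v - pb) else f k) w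
                = some ((f w).getD v - pb) from by simp [pvF, hm]]
            rw [pvTot_eq_zero rest w hm]
            ring_nf
        · have hne : ¬ pk = w := fun h => hw h.symm
          have hmem : (w ∈ ((pk, pb) :: rest).map Prod.fst) ↔ (w ∈ rest.map Prod.fst) := by
            rw [List.map_cons, List.mem_cons]
            exact or_iff_right hw
          simp only [pvF, hmem, pvTot_cons_ne (pk, pb) rest w hne, hw, if_false]
      rw [hsub, ih, hfe]
    · have hsub : pvSub (PySem.Dict.mk (pvOvr l f)) (pk, pb) = PySem.Dict.mk (pvOvr l f) := by
        rw [pvSub]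
        simp only []
        rw [pv_contains_ovr]
        simp [hc]
      have hfe : pvF l rest f = pvF l ((pk, pb) :: rest) f := by
        funext w
        by_cases hw : w = pk
        · subst hw; simp [pvF, hc]
        · have hne : ¬ pk = w := fun h => hw h.symm
          have hmem : (w ∈ ((pk, pb) :: rest).map Prod.fst) ↔ (w ∈ rest.map Prod.fst) := by
            rw [List.map_cons, List.mem_cons]
            exact or_iff_right hw
          simp only [pvF, hmem, pvTot_cons_ne (pk, pb) rest w hne]
      rw [hsub, ih, hfe]

theorem pv_F_dom (l ops : List (String × Int)) (f : String → Option Int) (k : String)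
    (h : pvF l ops f k ≠ none) : f k ≠ none ∨ k ∈ ops.map Prod.fst := by
  unfold pvF at h
  split_ifs at h with hcc
  · exact Or.inr hcc.2
  · exact Or.inl h

-- ---- A's loop is the sequential run of the elementary updates

theorem pv_stepA_sub (l : List (String × Int)) (f : String → Option Int) (key w : String) (b : Int)
    (hf : ∀ k, f k ≠ none → '_' ∉ k.toList) (hkey : '_' ∈ key.toList)
    (hb : (PySem.Dict.mk l).get? key = some b) :
    pvStepWordA key (PySem.Dict.mk (pvOvr l f)) w = pvSub (PySem.Dict.mk (pvOvr l f)) (w, b) := by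
  have hfk : f key = none := by
    cases hfk : f key with
    | none => rfl
    | some x => exact absurd hkey (hf key (by simp [hfk]))
  have hg : (PySem.Dict.mk (pvOvr l f)).get? key = some b := by
    rw [pv_get?_ovr, hb]
    simp [hfk]
  rw [pvStepWordA]
  cases hw : (PySem.Dict.mk (pvOvr l f)).get? w with
  | none =>
    have hcw : (PySem.Dict.mk (pvOvr l f)).contains w = false := by
      rw [PySem.Dict.contains_eq_isSome_get?, hw]; rfl
    rw [pvSub]
    simp only []
    rw [pv_contains_ovr] at hcw
    rw [pv_contains_ovr, hcw]
    simp
  | some a =>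
    have hcw : (PySem.Dict.mk (pvOvr l f)).contains w = true := by
      rw [PySem.Dict.contains_eq_isSome_get?, hw]; rfl
    have hgd : (PySem.Dict.mk (pvOvr l f)).getD w 0 = a := by
      rw [PySem.Dict.getD, hw]; rfl
    rw [hg, pvSub]
    simp only []
    rw [pv_contains_ovr] at hcw
    rw [pv_contains_ovr, hcw, hgd]
    simp

theorem pv_innerA (l : List (String × Int)) (key : String) (b : Int)
    (hkey : '_' ∈ key.toList) (hb : (PySem.Dict.mk l).get? key = some b) :
    ∀ (ws : List String) (f : String → Option Int), (∀ w ∈ ws, '_' ∉ w.toList) →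
    (∀ k, f k ≠ none → '_' ∉ k.toList) →
    ws.foldl (pvStepWordA key) (PySem.Dict.mk (pvOvr l f))
      = (ws.map (fun w => (w, b))).foldl pvSub (PySem.Dict.mk (pvOvr l f)) := by
  intro ws
  induction ws with
  | nil => intro f _ _; rfl
  | cons w ws ih =>
    intro f hws hf
    rw [List.map_cons, List.foldl_cons, List.foldl_cons,
      pv_stepA_sub l f key w b hf hkey hb]
    have h1 : pvSub (PySem.Dict.mk (pvOvr l f)) (w, b)
        = PySem.Dict.mk (pvOvr l (pvF l [(w, b)] f)) := by
      simpa using pv_subrun l [(w, b)] f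
    rw [h1]
    exact ih (pvF l [(w, b)] f) (fun x hx => hws x (List.mem_cons_of_mem _ hx)) (fun k hk => by
      rcases pv_F_dom l [(w, b)] f k hk with h | h
      · exact hf k h
      · have : k = w := by simpa using h
        subst this
        exact hws k (by simp))

theorem pv_outerA (l : List (String × Int)) : ∀ (rest : List (String × Int)) (f : String → Option Int),
    (∀ kv ∈ rest, kv ∈ l) → (∀ k, f k ≠ none → '_' ∉ k.toList) →
    rest.foldl (fun d kv =>
        if 2 ≤ (pvSplitU kv.1).length then (pvSplitU kv.1).foldl (pvStepWordA kv.1) d else d)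
      (PySem.Dict.mk (pvOvr l f))
      = (rest.flatMap (pvOps l)).foldl pvSub (PySem.Dict.mk (pvOvr l f)) := by
  intro rest
  induction rest with
  | nil => intro f _ _; rfl
  | cons kv rest ih =>
    intro f hsub hf
    rw [List.foldl_cons, List.flatMap_cons, List.foldl_append]
    by_cases hph : 2 ≤ (pvSplitU kv.1).length
    · rw [if_pos hph]
      have hkv : kv ∈ l := hsub kv (by simp)
      have hcont : (PySem.Dict.mk l).contains kv.1 = true := by
        rw [PySem.Dict.contains]
        exact List.any_eq_true.mpr ⟨kv, hkv, by simp⟩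
      obtain ⟨v, hv⟩ := pv_mem_get? l kv.1 hcont
      have hvd : (PySem.Dict.mk l).getD kv.1 0 = v := by rw [PySem.Dict.getD, hv]; rfl
      have hkey : '_' ∈ kv.1.toList := pv_key_has_sep hph
      have hops : pvOps l kv = (pvSplitU kv.1).map (fun w => (w, v)) := by
        rw [pvOps, if_pos hph, hvd]
      have h2 : ((pvSplitU kv.1).map (fun w => (w, v))).foldl pvSub (PySem.Dict.mk (pvOvr l f))
          = PySem.Dict.mk (pvOvr l (pvF l ((pvSplitU kv.1).map (fun w => (w, v))) f)) :=
        pv_subrun l _ f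
      rw [pv_innerA l kv.1 v hkey hv (pvSplitU kv.1) f (fun w hw => pv_tok_no_sep hw) hf]
      rw [hops, h2]
      exact ih _ (fun x hx => hsub x (List.mem_cons_of_mem _ hx)) (fun k hk => by
        rcases pv_F_dom l _ f k hk with h | h
        · exact hf k h
        · obtain ⟨wtok, hw1, hw2⟩ := List.mem_map.mp h
          obtain ⟨w0, hw0, rfl⟩ := List.mem_map.mp hw1
          exact hw2 ▸ pv_tok_no_sep hw0)
    · rw [if_neg hph]
      have : pvOps l kv = [] := by rw [pvOps, if_neg hph]
      rw [this, List.foldl_nil]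
      exact ih f (fun x hx => hsub x (List.mem_cons_of_mem _ hx)) hf

-- ---- B's two passes

theorem pv_modsum (w : String) : ∀ (ps : List (String × Int)) (c : PySem.Dict String Int),
    (ps.foldl (fun c p => c.modify p.1 0 (· + p.2)) c).getD w 0 = c.getD w 0 + pvTot ps w := by
  intro ps
  induction ps with
  | nil => intro c; simp [pvTot]
  | cons p rest ih =>
    intro c
    rw [List.foldl_cons, ih, PySem.Dict.getD_modify]
    by_cases hw : w = p.1
    · subst hw
      rw [if_pos rfl, pvTot_cons_self]
      ring
    · rw [if_neg hw, pvTot_cons_ne p rest w (fun h => hw h.symm)]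

theorem pv_applyfold : ∀ (ps : List (String × Int)) (d : PySem.Dict String Int),
    (∀ p ∈ ps, d.contains p.1 = true) →
    ps.foldl (fun d wc => d.insert wc.1 (d.getD wc.1 0 - wc.2)) d = ps.foldl pvSub d := by
  intro ps
  induction ps with
  | nil => intro d _; rfl
  | cons p rest ih =>
    intro d hd
    rw [List.foldl_cons, List.foldl_cons]
    have hc : d.contains p.1 = true := hd p (by simp)
    have h1 : pvSub d p = d.insert p.1 (d.getD p.1 0 - p.2) := by rw [pvSub, if_pos hc]
    rw [h1]
    exact ih _ (fun q hq => by
      rw [PySem.Dict.contains_insert, hd q (List.mem_cons_of_mem _ hq)]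
      simp)

-- ---- B's aggregated updates, named

def pvOpsAll (l : List (String × Int)) : List (String × Int) := l.flatMap (pvOps l)

def pvOpsP (l : List (String × Int)) : List (String × Int) :=
  (pvOpsAll l).filter (fun p => (PySem.Dict.mk l).contains p.1)

def pvCorr (l : List (String × Int)) : PySem.Dict String Int :=
  (pvOpsP l).foldl (fun c p => c.modify p.1 0 (· + p.2)) PySem.Dict.empty

theorem pv_corr_flat (l : List (String × Int)) : ∀ (rest : List (String × Int)) (c : PySem.Dict String Int),
    rest.foldl (fun c kv =>
        if 2 ≤ (pvSplitU kv.1).length then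
          (pvSplitU kv.1).foldl (fun c w =>
            if (PySem.Dict.mk l).contains w then c.modify w 0 (· + (PySem.Dict.mk l).getD kv.1 0) else c) c
        else c) c
      = (rest.flatMap (pvOps l)).foldl (fun c p =>
          if (PySem.Dict.mk l).contains p.1 then c.modify p.1 0 (· + p.2) else c) c := by
  intro rest
  induction rest with
  | nil => intro c; rfl
  | cons kv rest ih =>
    intro c
    rw [List.foldl_cons, List.flatMap_cons, List.foldl_append, ih]
    congr 1
    by_cases hph : 2 ≤ (pvSplitU kv.1).length
    · rw [if_pos hph, pvOps, if_pos hph, List.foldl_map]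
    · rw [if_neg hph, pvOps, if_neg hph, List.foldl_nil]

theorem pv_corr_eq (l : List (String × Int)) :
    (l.flatMap (pvOps l)).foldl (fun c p =>
        if (PySem.Dict.mk l).contains p.1 then c.modify p.1 0 (· + p.2) else c) PySem.Dict.empty
      = pvCorr l := by
  rw [pvCorr, pvOpsP, pvOpsAll]
  exact PySem.List.foldl_if_eq_foldl_filter (fun (p : String × Int) => (PySem.Dict.mk l).contains p.1)
    (fun (c : PySem.Dict String Int) (p : String × Int) => c.modify p.1 0 (· + p.2)) _ _

theorem pv_corr_keys (l : List (String × Int)) :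
    (pvCorr l).keys = PySem.Set.ofList ((pvOpsP l).map Prod.fst) := by
  rw [pvCorr, PySem.Dict.keys_foldl_modify_key (pvOpsP l) Prod.fst 0 (fun _ p => (· + p.2)),
    PySem.Dict.keys_empty]
  rfl

theorem pv_corr_nodup (l : List (String × Int)) : (pvCorr l).keys.Nodup := by
  rw [pvCorr]
  exact PySem.Dict.nodup_keys_foldl_modify_key (pvOpsP l) Prod.fst 0 (fun _ p => (· + p.2))
    PySem.Dict.empty (by simp [PySem.Dict.keys_empty])

theorem pv_corr_getD (l : List (String × Int)) (w : String) :
    (pvCorr l).getD w 0 = pvTot (pvOpsP l) w := by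
  rw [pvCorr, pv_modsum, PySem.Dict.getD_empty, zero_add]

theorem pv_tot_P (l : List (String × Int)) (w : String)
    (hc : (PySem.Dict.mk l).contains w = true) : pvTot (pvOpsP l) w = pvTot (pvOpsAll l) w := by
  rw [pvTot, pvOpsP, List.filter_filter, pvTot]
  congr 2
  apply List.filter_congr
  intro p _
  by_cases hp : p.1 = w
  · simp [hp, hc]
  · simp [hp]

theorem pv_mem_P (l : List (String × Int)) (w : String)
    (hc : (PySem.Dict.mk l).contains w = true) :
    w ∈ (pvOpsP l).map Prod.fst ↔ w ∈ (pvOpsAll l).map Prod.fst := by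
  constructor
  · intro h
    obtain ⟨p, hp, rfl⟩ := List.mem_map.mp h
    exact List.mem_map.mpr ⟨p, (List.mem_filter.mp hp).1, rfl⟩
  · intro h
    obtain ⟨p, hp, rfl⟩ := List.mem_map.mp h
    exact List.mem_map.mpr ⟨p, List.mem_filter.mpr ⟨hp, hc⟩, rfl⟩

theorem pv_tot_items (l : List (String × Int)) (w : String) (hw : w ∈ (pvCorr l).keys) :
    pvTot ((pvCorr l).items) w = (pvCorr l).getD w 0 := by
  rw [pvTot, PySem.Dict.items_eq_map_keys (pvCorr l) (pv_corr_nodup l) 0, List.filter_map]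
  have h1 : ((pvCorr l).keys.filter ((fun p => p.1 == w) ∘ fun k => (k, (pvCorr l).getD k 0)))
      = [w] := by
    have : ((fun p => p.1 == w) ∘ fun k => (k, (pvCorr l).getD k 0)) = fun k => k == w := rfl
    rw [this, List.filter_beq, List.count_eq_one_of_mem (pv_corr_nodup l) hw]
    rfl
  rw [h1]
  simp

theorem pvA_closed (l : List (String × Int)) :
    pvDictA l = pvOvr l (pvF l (pvOpsAll l) (fun _ => none)) := by
  rw [pvDictA]
  have h0 : (PySem.Dict.mk l : PySem.Dict String Int)
      = PySem.Dict.mk (pvOvr l (fun _ => none)) := by rw [pv_ovr_none]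
  conv_lhs => rw [h0]
  rw [pv_outerA l l (fun _ => none) (fun kv h => h) (fun k hk => absurd rfl hk),
    pv_subrun, pvOpsAll]

theorem pvB_closed (l : List (String × Int)) :
    pvDictB l = pvOvr l (pvF l ((pvCorr l).items) (fun _ => none)) := by
  simp only [pvDictB]
  rw [pv_corr_flat, pv_corr_eq]
  have hcont : ∀ p ∈ (pvCorr l).items, (PySem.Dict.mk l : PySem.Dict String Int).contains p.1 = true := by
    intro p hp
    have hk : p.1 ∈ (pvCorr l).keys := by
      simp only [PySem.Dict.keys]
      exact List.mem_map.mpr ⟨p, hp, rfl⟩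
    rw [pv_corr_keys] at hk
    have := (PySem.Set.mem_ofList _ _).mp hk
    obtain ⟨q, hq, hqe⟩ := List.mem_map.mp this
    rw [← hqe]
    exact (List.mem_filter.mp hq).2
  rw [pv_applyfold ((pvCorr l).items) (PySem.Dict.mk l) hcont]
  have h0 : (PySem.Dict.mk l : PySem.Dict String Int)
      = PySem.Dict.mk (pvOvr l (fun _ => none)) := by rw [pv_ovr_none]
  conv_lhs => rw [h0]
  rw [pv_subrun]

-- ---- per-dict equivalence, then the theorem

theorem pv_dict_eq (l : List (String × Int)) : pvDictA l = pvDictB l := by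
  rw [pvA_closed, pvB_closed]
  congr 1
  funext w
  by_cases hc : (PySem.Dict.mk l).contains w = true
  · by_cases hm : w ∈ (pvOpsAll l).map Prod.fst
    · have hm' : w ∈ ((pvCorr l).items).map Prod.fst := by
        have hk : w ∈ (pvCorr l).keys := by
          rw [pv_corr_keys]
          exact (PySem.Set.mem_ofList _ _).mpr ((pv_mem_P l w hc).mpr hm)
        rw [PySem.Dict.items_eq_map_keys (pvCorr l) (pv_corr_nodup l) 0, List.map_map]
        exact List.mem_map.mpr ⟨w, hk, rfl⟩
      have hkk : w ∈ (pvCorr l).keys := by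
        rw [pv_corr_keys]
        exact (PySem.Set.mem_ofList _ _).mpr ((pv_mem_P l w hc).mpr hm)
      rw [pvF, pvF, if_pos ⟨hc, hm⟩, if_pos ⟨hc, hm'⟩,
        pv_tot_items l w hkk, pv_corr_getD, pv_tot_P l w hc]
    · have hm' : w ∉ ((pvCorr l).items).map Prod.fst := by
        intro hcon
        apply hm
        have hk : w ∈ (pvCorr l).keys := by
          simp only [PySem.Dict.keys]
          obtain ⟨p, hp, rfl⟩ := List.mem_map.mp hcon
          exact List.mem_map.mpr ⟨p, hp, rfl⟩
        rw [pv_corr_keys] at hk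
        exact (pv_mem_P l w hc).mp ((PySem.Set.mem_ofList _ _).mp hk)
      rw [pvF, pvF, if_neg (fun h => hm h.2), if_neg (fun h => hm' h.2)]
  · rw [pvF, pvF, if_neg (fun h => hc h.1), if_neg (fun h => hc h.1)]

-- ===== VERDICT (by name: the statement is the Claim_ definition above) =====
theorem subsum_correction_spec : Claim_equal_subsum_correction := by
  intro tfs _
  unfold Spec_subsum_correction subsum_correction subsum_correction_alt
  exact List.map_congr_left (fun l _ => pv_dict_eq l)
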